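-- pv_equiv track=rewrite | github.com/olimiemma/ARC-Prize-2025-Kaggle-ARC-AGI-2-Benchmark- | arc_prize_2025_submission/versions/arc_solver_v3.py | infer_size_deltas
-- ===== SOURCE A (Python) =====
-- from typing import Any, Dict, List, Tuple, Optional, Deque
--
-- Grid = List[List[int]]
--
-- def dims(g: Grid) -> Tuple[int, int]:
--     return (len(g), len(g[0]) if g else 0)
--
-- def infer_size_deltas(train_pairs: List[Tuple[Grid, Grid]]) -> Optional[Tuple[int, int]]:
--     dh: Optional[int] = None
--     dw: Optional[int] = None
--     for src, dst in train_pairs: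
--         h1, w1 = dims(src)
--         h2, w2 = dims(dst)
--         d_h, d_w = h2 - h1, w2 - w1
--         if dh is None:
--             dh, dw = d_h, d_w
--         else:
--             if dh != d_h or dw != d_w:
--                 return None
--     return (dh or 0, dw or 0)
-- ===== SOURCE B (Python) =====
-- def dims(g):
--     return (len(g), len(g[0]) if g else 0)
--
-- def infer_size_deltas(train_pairs):
--     if not train_pairs:
--         return (0, 0)
--
--     def solve(lo, hi):
--         # common size delta of pairs lo..hi-1, or None on conflict (always hi > lo)
--         if hi - lo == 1:
--             src, dst = train_pairs[lo]
--             h1, w1 = dims(src)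
--             h2, w2 = dims(dst)
--             return (h2 - h1, w2 - w1)
--         mid = (lo + hi) // 2
--         left = solve(lo, mid)
--         right = solve(mid, hi)
--         if left is None or right is None or left != right:
--             return None
--         return left
--
--     return solve(0, len(train_pairs))
-- ===== Notes on version B (the rewrite author's own statement) =====
-- stated objective: alternative
-- what changed: Replaces A's linear stateful scan with Optional running deltas and early return by a divide-and-conquer recursion over index ranges that computes each half's common delta and merges them, None marking a conflict.
import Mathlib
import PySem

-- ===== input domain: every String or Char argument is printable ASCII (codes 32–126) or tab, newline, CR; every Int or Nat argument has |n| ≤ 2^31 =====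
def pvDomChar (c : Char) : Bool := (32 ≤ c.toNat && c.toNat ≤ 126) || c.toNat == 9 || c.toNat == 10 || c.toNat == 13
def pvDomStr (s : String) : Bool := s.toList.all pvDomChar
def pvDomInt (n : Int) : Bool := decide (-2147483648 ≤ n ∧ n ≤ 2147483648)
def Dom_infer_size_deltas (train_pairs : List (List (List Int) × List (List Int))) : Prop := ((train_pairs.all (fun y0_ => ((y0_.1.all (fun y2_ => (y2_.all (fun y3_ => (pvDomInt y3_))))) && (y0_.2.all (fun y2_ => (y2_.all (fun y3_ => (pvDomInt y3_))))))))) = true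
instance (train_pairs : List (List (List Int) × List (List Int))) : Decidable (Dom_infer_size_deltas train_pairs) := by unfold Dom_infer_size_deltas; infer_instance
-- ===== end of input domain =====

-- B replaces A's linear stateful scan (Optional running deltas, early return) by a
-- divide-and-conquer recursion over index ranges merging each half's common delta
-- (objective: alternative, same cost).

-- ===== PORT A =====
-- dims(g) = (len(g), len(g[0]) if g else 0)  (shared module helper of both Pythons)
def dims (g : List (List Int)) : Int × Int :=
  ((g.length : Int), match g with | [] => 0 | r :: _ => (r.length : Int))

-- literal port of Python's `x or 0` on an int x
def pyOrZero (x : Int) : Int := if x = 0 then 0 else x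

-- A's for-loop over train_pairs with the running Optional state (dh, dw);
-- returning at [] performs A's final `return (dh or 0, dw or 0)`.
def inferLoop : Option (Int × Int) → List (List (List Int) × List (List Int)) → Option (Int × Int)
  | st, [] =>
    match st with
    | none => some (0, 0)
    | some (dh, dw) => some (pyOrZero dh, pyOrZero dw)
  | st, (src, dst) :: rest =>
    let h1 := (dims src).1
    let w1 := (dims src).2
    let h2 := (dims dst).1
    let w2 := (dims dst).2
    let dH := h2 - h1
    let dW := w2 - w1
    match st with
    | none => inferLoop (some (dH, dW)) rest
    | some (dh, dw) => if dh ≠ dH ∨ dw ≠ dW then none else inferLoop (some (dh, dw)) rest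

def infer_size_deltas (train_pairs : List (List (List Int) × List (List Int))) : Option (Int × Int) :=
  inferLoop none train_pairs

-- ===== PORT B =====
-- B's inner `solve(lo, hi)`: common delta of pairs lo..hi-1, none on conflict.
-- B only ever calls it with lo < hi; the `hi - lo ≤ 1` guard (Python: `== 1`) and the
-- `getD` default only make the same computation total, they are never taken on B's calls.
def solveB (tps : List (List (List Int) × List (List Int))) (lo hi : Nat) : Option (Int × Int) :=
  if hi - lo ≤ 1 then
    let p := tps.getD lo ([], [])
    let src := p.1
    let dst := p.2
    let h1 := (dims src).1
    let w1 := (dims src).2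
    let h2 := (dims dst).1
    let w2 := (dims dst).2
    some (h2 - h1, w2 - w1)
  else
    let mid := (lo + hi) / 2
    let left := solveB tps lo mid
    let right := solveB tps mid hi
    if left = none ∨ right = none ∨ left ≠ right then none else left
termination_by hi - lo
decreasing_by all_goals omega

def infer_size_deltas_alt (train_pairs : List (List (List Int) × List (List Int))) : Option (Int × Int) :=
  if train_pairs = [] then some (0, 0)
  else solveB train_pairs 0 train_pairs.length

-- ===== PRECONDITION & SPEC =====
def Spec_infer_size_deltas (train_pairs : List (List (List Int) × List (List Int))) (out : Option (Int × Int)) : Prop := out = infer_size_deltas_alt train_pairs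
instance (train_pairs : List (List (List Int) × List (List Int))) (out : Option (Int × Int)) : Decidable (Spec_infer_size_deltas train_pairs out) := by unfold Spec_infer_size_deltas; infer_instance

-- ===== CLAIM (what is proved, stated in full; the proofs are below) =====
def Claim_equal_infer_size_deltas : Prop := ∀ (train_pairs : List (List (List Int) × List (List Int))), Dom_infer_size_deltas train_pairs → Spec_infer_size_deltas train_pairs (infer_size_deltas train_pairs)

-- ===== LEMMAS AND PROOFS =====

-- the size delta of one (src, dst) pair
def deltaOf (p : List (List Int) × List (List Int)) : Int × Int :=
  ((dims p.2).1 - (dims p.1).1, (dims p.2).2 - (dims p.1).2)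

theorem pyOrZero_eq (x : Int) : pyOrZero x = x := by
  unfold pyOrZero; split_ifs with h <;> omega

-- A's loop with state some d: returns d iff every remaining delta equals d, else none
theorem inferLoop_some (rest : List (List (List Int) × List (List Int))) (d : Int × Int) :
    inferLoop (some d) rest =
      if rest.all (fun p => deltaOf p = d) then some d else none := by
  induction rest with
  | nil => simp [inferLoop, pyOrZero_eq]
  | cons p rest ih =>
    obtain ⟨src, dst⟩ := p
    obtain ⟨dh, dw⟩ := d
    by_cases h : deltaOf (src, dst) = (dh, dw)
    · have h1 : dh = (dims dst).1 - (dims src).1 := by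
        have := congrArg Prod.fst h; simpa [deltaOf] using this.symm
      have h2 : dw = (dims dst).2 - (dims src).2 := by
        have := congrArg Prod.snd h; simpa [deltaOf] using this.symm
      simp only [inferLoop, ← h1, ← h2, ih, List.all_cons]
      rw [if_neg (show ¬(dh ≠ dh ∨ dw ≠ dw) by simp)]
      exact if_congr (by rw [h]; simp) rfl rfl
    · have : dh ≠ (dims dst).1 - (dims src).1 ∨ dw ≠ (dims dst).2 - (dims src).2 := by
        by_contra hc
        push Not at hc
        exact h (by simp [deltaOf, hc.1.symm, hc.2.symm])
      simp [inferLoop]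
      rw [if_pos this]
      simp [h]

-- B's solve on an in-range nonempty segment: the delta of pair lo if all deltas in
-- [lo, hi) agree with it, else none
theorem solveB_char (tps : List (List (List Int) × List (List Int))) :
    ∀ n lo hi, hi - lo = n → lo < hi → hi ≤ tps.length →
    solveB tps lo hi =
      if ∀ i, lo ≤ i → i < hi → deltaOf (tps.getD i ([], [])) = deltaOf (tps.getD lo ([], []))
      then some (deltaOf (tps.getD lo ([], []))) else none := by
  intro n
  induction n using Nat.strong_induction_on with
  | _ n ih =>
    intro lo hi hn hlt hle
    by_cases hbase : hi - lo ≤ 1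
    · have hhi : hi = lo + 1 := by omega
      rw [solveB, if_pos hbase]
      rw [if_pos (by intro i h1 h2; simp only [show i = lo by omega])]
      rfl
    · rw [solveB, if_neg hbase]
      show (if solveB tps lo ((lo + hi) / 2) = none ∨ solveB tps ((lo + hi) / 2) hi = none ∨
              solveB tps lo ((lo + hi) / 2) ≠ solveB tps ((lo + hi) / 2) hi
            then none else solveB tps lo ((lo + hi) / 2)) = _
      set mid := (lo + hi) / 2 with hmid
      have hm1 : lo < mid := by omega
      have hm2 : mid < hi := by omega
      rw [ih (mid - lo) (by omega) lo mid rfl hm1 (by omega),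
          ih (hi - mid) (by omega) mid hi rfl hm2 hle]
      by_cases hL : ∀ i, lo ≤ i → i < mid → deltaOf (tps.getD i ([], [])) = deltaOf (tps.getD lo ([], []))
      · rw [if_pos hL]
        by_cases hR : ∀ i, mid ≤ i → i < hi → deltaOf (tps.getD i ([], [])) = deltaOf (tps.getD mid ([], []))
        · rw [if_pos hR]
          by_cases heq : deltaOf (tps.getD mid ([], [])) = deltaOf (tps.getD lo ([], []))
          · have hall : ∀ i, lo ≤ i → i < hi → deltaOf (tps.getD i ([], [])) = deltaOf (tps.getD lo ([], [])) := by
              intro i hi1 hi2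
              by_cases hi3 : i < mid
              · exact hL i hi1 hi3
              · rw [hR i (by omega) hi2, heq]
            rw [if_pos hall,
                if_neg (show ¬(some (deltaOf (tps.getD lo ([], []))) = none ∨
                    some (deltaOf (tps.getD mid ([], []))) = none ∨
                    some (deltaOf (tps.getD lo ([], []))) ≠ some (deltaOf (tps.getD mid ([], []))))
                  from fun hc => by
                    rcases hc with hc | hc | hc
                    · exact Option.some_ne_none _ hc
                    · exact Option.some_ne_none _ hc
                    · exact hc (by rw [heq]))]
          · rw [if_neg (show ¬(∀ i, lo ≤ i → i < hi → deltaOf (tps.getD i ([], [])) = deltaOf (tps.getD lo ([], [])))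
                  from fun hall => heq (hall mid (by omega) hm2)),
                if_pos (Or.inr (Or.inr (fun hc => heq (Option.some.inj hc).symm)))]
        · rw [if_neg hR,
              if_pos (Or.inr (Or.inl rfl)),
              if_neg (show ¬(∀ i, lo ≤ i → i < hi → deltaOf (tps.getD i ([], [])) = deltaOf (tps.getD lo ([], [])))
                from fun hall => hR (fun i h1 h2 => by
                  rw [hall i (by omega) h2, hall mid (by omega) hm2]))]
      · rw [if_neg hL,
            if_pos (Or.inl rfl),
            if_neg (show ¬(∀ i, lo ≤ i → i < hi → deltaOf (tps.getD i ([], [])) = deltaOf (tps.getD lo ([], [])))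
              from fun hall => hL (fun i h1 h2 => hall i h1 (by omega)))]

-- the list-side "all deltas equal the head's" matches the index-side condition on (p :: rest)
theorem all_iff_forall_idx (p : List (List Int) × List (List Int))
    (rest : List (List (List Int) × List (List Int))) :
    (rest.all (fun q => deltaOf q = deltaOf p) = true) ↔
    (∀ i, 0 ≤ i → i < (p :: rest).length →
      deltaOf ((p :: rest).getD i ([], [])) = deltaOf ((p :: rest).getD 0 ([], []))) := by
  simp only [List.all_eq_true, decide_eq_true_eq]
  constructor
  · intro h i _ hi
    cases i with
    | zero => rfl
    | succ j =>
      simp only [List.length_cons] at hi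
      have hj : j < rest.length := by omega
      have hg : (p :: rest).getD (j + 1) ([], []) = rest[j] := by
        simp [List.getD_eq_getElem?_getD, List.getElem?_eq_getElem hj]
      rw [hg, List.getD_cons_zero]
      exact h _ (List.getElem_mem hj)
  · intro h q hq
    obtain ⟨j, hj, rfl⟩ := List.getElem_of_mem hq
    have := h (j + 1) (by omega) (by simp; omega)
    simpa [List.getD_cons_succ, List.getD_eq_getElem?_getD, List.getElem?_eq_getElem hj] using this

-- ===== VERDICT (by name: the statement is the Claim_ definition above) =====
theorem infer_size_deltas_spec : Claim_equal_infer_size_deltas := by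
  intro tps _
  unfold Spec_infer_size_deltas infer_size_deltas infer_size_deltas_alt
  cases tps with
  | nil => rfl
  | cons p rest =>
    obtain ⟨src, dst⟩ := p
    have hstep : inferLoop none ((src, dst) :: rest) =
        inferLoop (some (deltaOf (src, dst))) rest := by
      simp [inferLoop, deltaOf]
    rw [hstep, inferLoop_some,
        if_neg (show ¬((src, dst) :: rest = []) by simp),
        solveB_char ((src, dst) :: rest) ((src, dst) :: rest).length 0 ((src, dst) :: rest).length rfl (by simp) le_rfl]
    have hiff := all_iff_forall_idx (src, dst) rest
    by_cases hall : rest.all (fun q => deltaOf q = deltaOf (src, dst)) = true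
    · rw [if_pos hall, if_pos (hiff.mp hall)]
      rfl
    · rw [if_neg hall, if_neg (fun h => hall (hiff.mpr h))]
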